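-- pv_equiv track=rewrite | github.com/basha-masthan/quick_app | quickapp/triage_service.py | _get_specialties_for_urgent
-- ===== SOURCE A (Python) =====
-- from typing import Dict, List, Tuple, Optional
--
-- def _get_specialties_for_urgent(text: str) -> List[str]:
--     """Get suggested specialties for urgent conditions"""
--     specialties = []
--     if any(word in text for word in ['chest', 'heart', 'cardiac']):
--         specialties.append('Cardiology')
--     if any(word in text for word in ['head', 'brain', 'neurological']):
--         specialties.append('Neurology')
--     if any(word in text for word in ['bone', 'fracture', 'joint']):
--         specialties.append('Orthopedics')
--     if any(word in text for word in ['breathing', 'lung', 'respiratory']):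
--         specialties.append('Pulmonology')
--     return specialties or ['Emergency Medicine']
-- ===== SOURCE B (Python) =====
-- # Text-driven multi-pattern scan: walk the text's positions once, looking up each
-- # candidate substring in a keyword->specialty map, instead of testing every keyword
-- # against the whole text; specialties are emitted in A's branch order.
--
-- _KEYWORD_SPEC = {
--     'chest': 'Cardiology', 'heart': 'Cardiology', 'cardiac': 'Cardiology',
--     'head': 'Neurology', 'brain': 'Neurology', 'neurological': 'Neurology',
--     'bone': 'Orthopedics', 'fracture': 'Orthopedics', 'joint': 'Orthopedics',
--     'breathing': 'Pulmonology', 'lung': 'Pulmonology', 'respiratory': 'Pulmonology',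
-- }
-- _LENGTHS = sorted({len(k) for k in _KEYWORD_SPEC})
-- _ORDER = ['Cardiology', 'Neurology', 'Orthopedics', 'Pulmonology']
--
-- def _get_specialties_for_urgent(text: str):
--     found = set()
--     for i in range(len(text)):
--         for L in _LENGTHS:
--             spec = _KEYWORD_SPEC.get(text[i:i + L])
--             if spec is not None:
--                 found.add(spec)
--     out = [s for s in _ORDER if s in found]
--     return out or ['Emergency Medicine']
-- ===== Notes on version B (the rewrite author's own statement) =====
-- stated objective: alternative
-- what changed: B inverts the search: instead of testing each hard-coded keyword against the whole text, it scans the text's positions once, looking up each candidate substring (at the keywords' lengths) in a keyword-to-specialty map and collecting the hit specialties in a set, then emits them in A's fixed branch order with the same Emergency Medicine fallback.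
import Mathlib
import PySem

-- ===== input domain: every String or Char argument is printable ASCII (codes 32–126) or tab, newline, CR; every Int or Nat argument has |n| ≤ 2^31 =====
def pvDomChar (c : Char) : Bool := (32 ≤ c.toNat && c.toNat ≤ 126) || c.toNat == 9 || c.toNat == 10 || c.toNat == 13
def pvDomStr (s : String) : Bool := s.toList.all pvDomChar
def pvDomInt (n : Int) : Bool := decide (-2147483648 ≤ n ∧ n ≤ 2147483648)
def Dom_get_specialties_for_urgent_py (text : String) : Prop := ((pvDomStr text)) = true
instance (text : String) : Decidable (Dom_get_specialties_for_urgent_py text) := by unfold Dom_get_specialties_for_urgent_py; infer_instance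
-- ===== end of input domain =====

-- B inverts the search: a single scan over the text's positions looking up candidate
-- substrings in a keyword->specialty map, instead of testing each keyword against the text.

-- ===== PORT A =====
def get_specialties_for_urgent_py (text : String) : List String :=
  let specialties : List String := []
  let specialties := if ["chest", "heart", "cardiac"].any (fun w => PySem.Str.isIn w text) then specialties ++ ["Cardiology"] else specialties
  let specialties := if ["head", "brain", "neurological"].any (fun w => PySem.Str.isIn w text) then specialties ++ ["Neurology"] else specialties
  let specialties := if ["bone", "fracture", "joint"].any (fun w => PySem.Str.isIn w text) then specialties ++ ["Orthopedics"] else specialties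
  let specialties := if ["breathing", "lung", "respiratory"].any (fun w => PySem.Str.isIn w text) then specialties ++ ["Pulmonology"] else specialties
  if specialties = [] then ["Emergency Medicine"] else specialties

-- ===== PORT B =====
-- _KEYWORD_SPEC: Python dict literal with distinct keys; keys as List Char so that text
-- slices compare exactly
def pvKwSpec : PySem.Dict (List Char) String := PySem.Dict.mk
  [("chest".toList, "Cardiology"), ("heart".toList, "Cardiology"), ("cardiac".toList, "Cardiology"),
   ("head".toList, "Neurology"), ("brain".toList, "Neurology"), ("neurological".toList, "Neurology"),
   ("bone".toList, "Orthopedics"), ("fracture".toList, "Orthopedics"), ("joint".toList, "Orthopedics"),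
   ("breathing".toList, "Pulmonology"), ("lung".toList, "Pulmonology"), ("respiratory".toList, "Pulmonology")]

-- _LENGTHS = sorted({len(k) for k in _KEYWORD_SPEC}) evaluates to this constant list
def pvLens : List Int := [4, 5, 7, 8, 9, 11, 12]

def pvOrder : List String := ["Cardiology", "Neurology", "Orthopedics", "Pulmonology"]

-- the scan loop: for i in range(len(text)): for L in _LENGTHS: spec = map.get(text[i:i+L]); if spec is not None: found.add(spec)
def pvFound (cs : List Char) : PySem.Set String :=
  (PySem.List.pyRange 0 (PySem.List.len cs) 1).foldl (fun acc i =>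
    pvLens.foldl (fun acc L =>
      match PySem.Dict.get? pvKwSpec (PySem.List.slice cs (some i) (some (i + L))) with
      | some s => PySem.Set.add acc s
      | none => acc) acc) PySem.Set.empty

def get_specialties_for_urgent_py_alt (text : String) : List String :=
  let found := pvFound text.toList
  let out := pvOrder.filter (fun s => PySem.Set.contains found s)
  if out = [] then ["Emergency Medicine"] else out

-- ===== PRECONDITION & SPEC =====
def Spec_get_specialties_for_urgent_py (text : String) (out : List String) : Prop := out = get_specialties_for_urgent_py_alt text
instance (text : String) (out : List String) : Decidable (Spec_get_specialties_for_urgent_py text out) := by unfold Spec_get_specialties_for_urgent_py; infer_instance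

-- ===== CLAIM (what is proved, stated in full; the proofs are below) =====
def Claim_equal_get_specialties_for_urgent_py : Prop := ∀ (text : String), Dom_get_specialties_for_urgent_py text → Spec_get_specialties_for_urgent_py text (get_specialties_for_urgent_py text)

-- ===== LEMMAS AND PROOFS =====

-- membership in a fold that conditionally adds to a set
theorem pv_mem_foldl_opt {ι : Type} (l : List ι) (f : ι → Option String) (s0 : PySem.Set String) (x : String) :
    x ∈ l.foldl (fun acc i => match f i with | some v => PySem.Set.add acc v | none => acc) s0 ↔
      x ∈ s0 ∨ ∃ i ∈ l, f i = some x := by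
  induction l generalizing s0 with
  | nil => simp
  | cons a t ih =>
    simp only [List.foldl_cons, ih, List.mem_cons]
    cases h : f a
    · simp [h]
    · simp [h, PySem.Set.mem_add]; tauto

-- membership in the nested scan fold
theorem pv_mem_scan (g : Int → Int → Option String) (l : List Int) (s0 : PySem.Set String) (x : String) :
    x ∈ l.foldl (fun acc i =>
        pvLens.foldl (fun acc L =>
          match g i L with
          | some s => PySem.Set.add acc s
          | none => acc) acc) s0 ↔
      x ∈ s0 ∨ ∃ i ∈ l, ∃ L ∈ pvLens, g i L = some x := by
  induction l generalizing s0 with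
  | nil => simp
  | cons a t ih =>
    simp only [List.foldl_cons, ih, List.mem_cons, pv_mem_foldl_opt, exists_eq_or_imp]
    rw [or_assoc]

-- characterisation of the literal dict lookup
set_option maxHeartbeats 1000000 in
theorem pv_get?_pvKwSpec (k : List Char) (x : String) :
    PySem.Dict.get? pvKwSpec k = some x ↔
      ((k = "chest".toList ∨ k = "heart".toList ∨ k = "cardiac".toList) ∧ x = "Cardiology") ∨
      ((k = "head".toList ∨ k = "brain".toList ∨ k = "neurological".toList) ∧ x = "Neurology") ∨
      ((k = "bone".toList ∨ k = "fracture".toList ∨ k = "joint".toList) ∧ x = "Orthopedics") ∨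
      ((k = "breathing".toList ∨ k = "lung".toList ∨ k = "respiratory".toList) ∧ x = "Pulmonology") := by
  simp only [pvKwSpec, PySem.Dict.get?_mk_cons, beq_iff_eq]
  split_ifs with h1 h2 h3 h4 h5 h6 h7 h8 h9 h10 h11 h12 <;>
    first
    | (subst_eqs
       simp only [Option.some_inj, eq_comm (b := x)]
       constructor
       · intro h
         simp only [h]
         decide
       · rintro (⟨h, rfl⟩ | ⟨h, rfl⟩ | ⟨h, rfl⟩ | ⟨h, rfl⟩) <;> first | rfl | exact absurd h (by decide))
    | (simp only [PySem.Dict.get?]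
       constructor
       · intro h; simp at h
       · rintro (⟨h, rfl⟩ | ⟨h, rfl⟩ | ⟨h, rfl⟩ | ⟨h, rfl⟩) <;>
           rcases h with rfl | rfl | rfl <;> simp_all)

-- a slice of cs is an infix of cs
theorem pv_slice_infix (cs : List Char) (j L : Nat) :
    ((cs.drop j).take L) <:+: cs :=
  ((cs.drop j).take_prefix L).isInfix.trans (cs.drop_suffix j).isInfix

-- the scan hits a nonempty word w of admitted length iff w is an infix of cs
theorem pv_scan_word (cs w : List Char) (hw : w ≠ []) (hL : (w.length : Int) ∈ pvLens) :
    (∃ i ∈ PySem.List.pyRange 0 (PySem.List.len cs) 1, ∃ L ∈ pvLens,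
        PySem.List.slice cs (some i) (some (i + L)) = w) ↔ w <:+: cs := by
  constructor
  · rintro ⟨i, hi, L, hLmem, hslice⟩
    rw [PySem.List.mem_pyRange_one] at hi
    have h0 : (0:Int) ≤ i := hi.1
    have hLpos : (0:Int) ≤ L := by
      simp [pvLens] at hLmem; rcases hLmem with h|h|h|h|h|h|h <;> omega
    rw [PySem.List.slice_toNat cs h0 (by omega)] at hslice
    rw [← hslice]
    exact pv_slice_infix cs _ _
  · intro hinf
    have hisin : PySem.Chars.isIn w cs = true := (PySem.Chars.isIn_iff_infix w cs).2 hinf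
    obtain ⟨j, hj⟩ := (PySem.Chars.exists_prefix_drop_iff_isIn w cs).2 hisin
    have hjlt : j < cs.length := by
      by_contra h
      rw [List.drop_eq_nil_of_le (by omega)] at hj
      exact hw (List.prefix_nil.1 hj)
    refine ⟨(j : Int), ?_, (w.length : Int), hL, ?_⟩
    · rw [PySem.List.mem_pyRange_one]
      simp
      omega
    · rw [PySem.List.slice_natCast_add]
      exact (List.prefix_iff_eq_take.1 hj).symm

-- existential distributes over the three-way slice disjunction
theorem pv_scan3 (cs w1 w2 w3 : List Char) (hw1 : w1 ≠ []) (hw2 : w2 ≠ []) (hw3 : w3 ≠ [])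
    (hl1 : (w1.length : Int) ∈ pvLens) (hl2 : (w2.length : Int) ∈ pvLens) (hl3 : (w3.length : Int) ∈ pvLens) :
    (∃ i ∈ PySem.List.pyRange 0 (PySem.List.len cs) 1, ∃ L ∈ pvLens,
        (PySem.List.slice cs (some i) (some (i + L)) = w1 ∨
         PySem.List.slice cs (some i) (some (i + L)) = w2 ∨
         PySem.List.slice cs (some i) (some (i + L)) = w3)) ↔
      (w1 <:+: cs ∨ w2 <:+: cs ∨ w3 <:+: cs) := by
  rw [← pv_scan_word cs w1 hw1 hl1, ← pv_scan_word cs w2 hw2 hl2, ← pv_scan_word cs w3 hw3 hl3]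
  constructor
  · rintro ⟨i, hi, L, hL, (h | h | h)⟩
    · exact Or.inl ⟨i, hi, L, hL, h⟩
    · exact Or.inr (Or.inl ⟨i, hi, L, hL, h⟩)
    · exact Or.inr (Or.inr ⟨i, hi, L, hL, h⟩)
  · rintro (⟨i, hi, L, hL, h⟩ | ⟨i, hi, L, hL, h⟩ | ⟨i, hi, L, hL, h⟩)
    · exact ⟨i, hi, L, hL, Or.inl h⟩
    · exact ⟨i, hi, L, hL, Or.inr (Or.inl h)⟩
    · exact ⟨i, hi, L, hL, Or.inr (Or.inr h)⟩

-- the four specialty membership facts, as Bool equalities against A's tests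
theorem pv_contains_card (text : String) :
    PySem.Set.contains (pvFound text.toList) "Cardiology" =
      (["chest", "heart", "cardiac"].any (fun w => PySem.Str.isIn w text)) := by
  rw [Bool.eq_iff_iff, PySem.Set.contains_iff]
  unfold pvFound
  rw [pv_mem_scan]
  simp only [pv_get?_pvKwSpec, PySem.Set.empty, List.not_mem_nil, false_or,
    List.any_cons, List.any_nil, Bool.or_eq_true, PySem.Str.isIn_iff_infix]
  simp only [eq_false (show ("Cardiology" : String) ≠ "Neurology" from by decide),
    eq_false (show ("Cardiology" : String) ≠ "Orthopedics" from by decide),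
    eq_false (show ("Cardiology" : String) ≠ "Pulmonology" from by decide),
    and_true, and_false, or_false, Bool.false_eq_true]
  exact pv_scan3 text.toList "chest".toList "heart".toList "cardiac".toList
    (by decide) (by decide) (by decide) (by decide) (by decide) (by decide)

theorem pv_contains_neuro (text : String) :
    PySem.Set.contains (pvFound text.toList) "Neurology" =
      (["head", "brain", "neurological"].any (fun w => PySem.Str.isIn w text)) := by
  rw [Bool.eq_iff_iff, PySem.Set.contains_iff]
  unfold pvFound
  rw [pv_mem_scan]
  simp only [pv_get?_pvKwSpec, PySem.Set.empty, List.not_mem_nil, false_or,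
    List.any_cons, List.any_nil, Bool.or_eq_true, PySem.Str.isIn_iff_infix]
  simp only [eq_false (show ("Neurology" : String) ≠ "Cardiology" from by decide),
    eq_false (show ("Neurology" : String) ≠ "Orthopedics" from by decide),
    eq_false (show ("Neurology" : String) ≠ "Pulmonology" from by decide),
    and_true, and_false, or_false, false_or, Bool.false_eq_true]
  exact pv_scan3 text.toList "head".toList "brain".toList "neurological".toList
    (by decide) (by decide) (by decide) (by decide) (by decide) (by decide)

theorem pv_contains_ortho (text : String) :
    PySem.Set.contains (pvFound text.toList) "Orthopedics" =
      (["bone", "fracture", "joint"].any (fun w => PySem.Str.isIn w text)) := by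
  rw [Bool.eq_iff_iff, PySem.Set.contains_iff]
  unfold pvFound
  rw [pv_mem_scan]
  simp only [pv_get?_pvKwSpec, PySem.Set.empty, List.not_mem_nil, false_or,
    List.any_cons, List.any_nil, Bool.or_eq_true, PySem.Str.isIn_iff_infix]
  simp only [eq_false (show ("Orthopedics" : String) ≠ "Cardiology" from by decide),
    eq_false (show ("Orthopedics" : String) ≠ "Neurology" from by decide),
    eq_false (show ("Orthopedics" : String) ≠ "Pulmonology" from by decide),
    and_true, and_false, or_false, false_or, Bool.false_eq_true]
  exact pv_scan3 text.toList "bone".toList "fracture".toList "joint".toList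
    (by decide) (by decide) (by decide) (by decide) (by decide) (by decide)

theorem pv_contains_pulmo (text : String) :
    PySem.Set.contains (pvFound text.toList) "Pulmonology" =
      (["breathing", "lung", "respiratory"].any (fun w => PySem.Str.isIn w text)) := by
  rw [Bool.eq_iff_iff, PySem.Set.contains_iff]
  unfold pvFound
  rw [pv_mem_scan]
  simp only [pv_get?_pvKwSpec, PySem.Set.empty, List.not_mem_nil, false_or,
    List.any_cons, List.any_nil, Bool.or_eq_true, PySem.Str.isIn_iff_infix]
  simp only [eq_false (show ("Pulmonology" : String) ≠ "Cardiology" from by decide),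
    eq_false (show ("Pulmonology" : String) ≠ "Neurology" from by decide),
    eq_false (show ("Pulmonology" : String) ≠ "Orthopedics" from by decide),
    and_true, and_false, or_false, false_or, Bool.false_eq_true]
  exact pv_scan3 text.toList "breathing".toList "lung".toList "respiratory".toList
    (by decide) (by decide) (by decide) (by decide) (by decide) (by decide)

-- ===== VERDICT (by name: the statement is the Claim_ definition above) =====
theorem get_specialties_for_urgent_py_spec : Claim_equal_get_specialties_for_urgent_py := by
  intro text _
  unfold Spec_get_specialties_for_urgent_py
  unfold get_specialties_for_urgent_py get_specialties_for_urgent_py_alt pvOrder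
  simp only [List.filter_cons, List.filter_nil, pv_contains_card, pv_contains_neuro,
    pv_contains_ortho, pv_contains_pulmo]
  cases h1 : (["chest", "heart", "cardiac"].any (fun w => PySem.Str.isIn w text)) <;>
  cases h2 : (["head", "brain", "neurological"].any (fun w => PySem.Str.isIn w text)) <;>
  cases h3 : (["bone", "fracture", "joint"].any (fun w => PySem.Str.isIn w text)) <;>
  cases h4 : (["breathing", "lung", "respiratory"].any (fun w => PySem.Str.isIn w text)) <;>
  simp
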